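-- pv_equiv track=rewrite | github.com/Boronen/akaszt-fa | functions.py | hiba_kigyo
-- ===== SOURCE A (Python) =====
-- def hiba_kigyo(hibak : int, maxhiba : int) -> str:
--     max_hiba = maxhiba
--     i=0
--     szoveg = ""
--     while i < max_hiba:
--         if i < hibak:
--             szoveg+="*"
--         else:
--             szoveg+="-"
--         i+=1
--     szoveg+="|"
--     return szoveg
-- ===== SOURCE B (Python) =====
-- def hiba_kigyo(hibak : int, maxhiba : int) -> str:
--     stars = max(0, min(hibak, maxhiba))
--     dashes = max(0, maxhiba) - stars
--     return "*" * stars + "-" * dashes + "|"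
-- ===== Notes on version B (the rewrite author's own statement) =====
-- stated objective: simpler
-- what changed: Replaces the per-position while-loop and branch with a closed form: two clamped counts (stars = max(0, min(hibak, maxhiba)), dashes = max(0, maxhiba) - stars) and string repetition.
import Mathlib
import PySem

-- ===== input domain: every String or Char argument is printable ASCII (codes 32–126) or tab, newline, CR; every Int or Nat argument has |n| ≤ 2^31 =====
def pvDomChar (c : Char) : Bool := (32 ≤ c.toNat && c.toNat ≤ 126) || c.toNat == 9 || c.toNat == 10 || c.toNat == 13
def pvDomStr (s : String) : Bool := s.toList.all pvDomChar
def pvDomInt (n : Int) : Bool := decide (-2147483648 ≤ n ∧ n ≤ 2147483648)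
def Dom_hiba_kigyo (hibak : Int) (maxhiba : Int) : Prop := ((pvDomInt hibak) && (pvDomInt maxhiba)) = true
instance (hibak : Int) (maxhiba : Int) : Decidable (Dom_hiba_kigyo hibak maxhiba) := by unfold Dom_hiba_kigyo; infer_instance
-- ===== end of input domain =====

-- B replaces A's per-position while-loop with two clamped counts and repetition (objective: simpler).

-- ===== PORT A =====
-- the while-loop: i counts up to maxhiba, appending '*' or '-' (strings carried as List Char)
def hkLoop (hibak maxhiba i : Int) (szoveg : List Char) : List Char :=
  if i < maxhiba then
    hkLoop hibak maxhiba (i + 1) (szoveg ++ [if i < hibak then '*' else '-'])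
  else
    szoveg ++ ['|']
termination_by (maxhiba - i).toNat
decreasing_by omega

def hiba_kigyo (hibak : Int) (maxhiba : Int) : String :=
  String.ofList (hkLoop hibak maxhiba 0 [])

-- ===== PORT B =====
def hiba_kigyo_alt (hibak : Int) (maxhiba : Int) : String :=
  let stars := (max 0 (min hibak maxhiba)).toNat
  let dashes := (max 0 maxhiba).toNat - stars
  String.ofList (List.replicate stars '*' ++ List.replicate dashes '-' ++ ['|'])

-- ===== PRECONDITION & SPEC =====
def Spec_hiba_kigyo (hibak : Int) (maxhiba : Int) (out : String) : Prop := out = hiba_kigyo_alt hibak maxhiba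
instance (hibak : Int) (maxhiba : Int) (out : String) : Decidable (Spec_hiba_kigyo hibak maxhiba out) := by unfold Spec_hiba_kigyo; infer_instance

-- ===== CLAIM (what is proved, stated in full; the proofs are below) =====
def Claim_equal_hiba_kigyo : Prop := ∀ (hibak : Int) (maxhiba : Int), Dom_hiba_kigyo hibak maxhiba → Spec_hiba_kigyo hibak maxhiba (hiba_kigyo hibak maxhiba)

-- ===== LEMMAS AND PROOFS =====
-- loop invariant: from position i, the loop appends the remaining stars, then dashes, then '|'
theorem hkLoop_eq (hibak maxhiba : Int) : ∀ (n : Nat) (i : Int) (szoveg : List Char),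
    (maxhiba - i).toNat = n →
    hkLoop hibak maxhiba i szoveg =
      szoveg ++ List.replicate (min hibak maxhiba - i).toNat '*'
        ++ List.replicate (n - (min hibak maxhiba - i).toNat) '-' ++ ['|'] := by
  intro n
  induction n with
  | zero =>
    intro i szoveg h
    have hle : maxhiba ≤ i := by omega
    have hst : (min hibak maxhiba - i).toNat = 0 := by omega
    rw [hkLoop]
    simp [hst, not_lt.mpr hle]
  | succ n ih =>
    intro i szoveg h
    have hlt : i < maxhiba := by omega
    rw [hkLoop, if_pos hlt]
    rw [ih (i + 1) _ (by omega)]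
    by_cases hs : i < hibak
    · have hst : (min hibak maxhiba - i).toNat = (min hibak maxhiba - (i + 1)).toNat + 1 := by
        omega
      simp [hs, hst, List.replicate_succ]
    · have hst0 : (min hibak maxhiba - i).toNat = 0 := by omega
      have hst1 : (min hibak maxhiba - (i + 1)).toNat = 0 := by omega
      simp [hs, hst0, hst1, List.replicate_succ]

-- ===== VERDICT (by name: the statement is the Claim_ definition above) =====
theorem hiba_kigyo_spec : Claim_equal_hiba_kigyo := by
  intro hibak maxhiba _
  unfold Spec_hiba_kigyo hiba_kigyo hiba_kigyo_alt
  rw [hkLoop_eq hibak maxhiba maxhiba.toNat 0 [] (by omega)]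
  have h1 : (max 0 (min hibak maxhiba)).toNat = (min hibak maxhiba - 0).toNat := by omega
  have h2 : (max 0 maxhiba).toNat = maxhiba.toNat := by omega
  simp [h1, h2]
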